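-- pv_equiv track=rewrite | github.com/cyanluna-git/ai.cycling.workout.planner | tests/test_tss_target_e2e.py | _calculate_best_streak
-- ===== SOURCE A (Python) =====
-- def _calculate_best_streak(statuses):
--     """Calculate best streak from a list of statuses (most recent first)."""
--     best = 0
--     current = 0
--     for s in reversed(statuses):
--         if s in ["achieved", "exceeded"]:
--             current += 1
--             best = max(best, current)
--         elif s == "in_progress":
--             continue
--         else:
--             current = 0
--     return best
-- ===== SOURCE B (Python) =====
-- def _calculate_best_streak(statuses):
--     """Calculate best streak from a list of statuses (most recent first)."""
--     good = [s in ("achieved", "exceeded") for s in statuses if s != "in_progress"]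
--     runs = []
--     i = 0
--     while i < len(good):
--         j = i + 1
--         while j < len(good) and good[j] == good[i]:
--             j += 1
--         runs.append((good[i], j - i))
--         i = j
--     return max([n for k, n in runs if k], default=0)
-- ===== Notes on version B (the rewrite author's own statement) =====
-- stated objective: alternative
-- what changed: B drops the reversed traversal with threaded current/best counters and instead filters out 'in_progress', maps statuses to booleans, materializes maximal runs (groupby-style), and takes the max length over the good runs (streak length is invariant under reversal).
import Mathlib
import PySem

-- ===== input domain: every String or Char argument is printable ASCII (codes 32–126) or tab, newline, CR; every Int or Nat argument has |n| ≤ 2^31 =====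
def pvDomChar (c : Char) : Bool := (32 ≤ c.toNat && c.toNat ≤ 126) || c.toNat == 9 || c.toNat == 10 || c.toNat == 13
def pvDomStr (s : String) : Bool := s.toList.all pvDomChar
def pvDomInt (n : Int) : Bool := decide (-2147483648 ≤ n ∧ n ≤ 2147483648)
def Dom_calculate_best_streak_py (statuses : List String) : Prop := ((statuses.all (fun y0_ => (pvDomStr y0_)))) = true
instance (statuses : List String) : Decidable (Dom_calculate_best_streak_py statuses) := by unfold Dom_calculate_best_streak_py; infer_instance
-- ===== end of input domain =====

-- B replaces A's reversed traversal with threaded best/current counters by filter + run-grouping +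
-- max over good-run lengths (objective: alternative decomposition, same cost); return values proved equal.

-- ===== PORT A =====
-- A's loop body (the three branches in A's order); A folds it over reversed(statuses).
def pvStepA (bc : Int × Int) (s : String) : Int × Int :=
  if s == "achieved" || s == "exceeded" then (max bc.1 (bc.2 + 1), bc.2 + 1)
  else if s == "in_progress" then bc
  else (bc.1, 0)

def calculate_best_streak_py (statuses : List String) : Int :=
  (statuses.reverse.foldl pvStepA (0, 0)).1

-- ===== PORT B =====
-- B's run-building while loop: scan to the end of the current run, emit (key, length), continue.
def pvRuns : List Bool → List (Bool × Int)
  | [] => []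
  | x :: t =>
    (x, 1 + (t.takeWhile (fun y => y == x)).length) :: pvRuns (t.dropWhile (fun y => y == x))
termination_by l => l.length
decreasing_by simp; exact List.length_dropWhile_le _ _

def calculate_best_streak_py_alt (statuses : List String) : Int :=
  let good := (statuses.filter (fun s => !(s == "in_progress"))).map
      (fun s => s == "achieved" || s == "exceeded")
  (PySem.List.max? (((pvRuns good).filter (fun p => p.1)).map (fun p => p.2))
      (fun n => n)).getD 0

-- ===== PRECONDITION & SPEC =====
def Spec_calculate_best_streak_py (statuses : List String) (out : Int) : Prop := out = calculate_best_streak_py_alt statuses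
instance (statuses : List String) (out : Int) : Decidable (Spec_calculate_best_streak_py statuses out) := by unfold Spec_calculate_best_streak_py; infer_instance

-- ===== CLAIM (what is proved, stated in full; the proofs are below) =====
def Claim_equal_calculate_best_streak_py : Prop := ∀ (statuses : List String), Dom_calculate_best_streak_py statuses → Spec_calculate_best_streak_py statuses (calculate_best_streak_py statuses)

-- ===== LEMMAS AND PROOFS =====

-- proof-only helpers
def pvStep (bc : Int × Int) (x : Bool) : Int × Int :=
  if x then (max bc.1 (bc.2 + 1), bc.2 + 1) else (bc.1, 0)

def pvM : List (Bool × Int) → Int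
  | [] => 0
  | (k, n) :: r => if k then max n (pvM r) else pvM r

def pvLead : List Bool → Int
  | [] => 0
  | true :: t => pvLead t + 1
  | false :: _ => 0

theorem pvRuns_nil : pvRuns [] = [] := by rw [pvRuns.eq_def]

theorem pvRuns_cons (x : Bool) (t : List Bool) :
    pvRuns (x :: t)
      = (x, 1 + ((t.takeWhile (fun y => y == x)).length : Int))
          :: pvRuns (t.dropWhile (fun y => y == x)) := by
  rw [pvRuns.eq_def]

theorem pvRuns_pos_aux (n : Nat) : ∀ (l : List Bool), l.length ≤ n → ∀ p ∈ pvRuns l, 1 ≤ p.2 := by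
  induction n with
  | zero =>
    intro l hl p hp
    have : l = [] := List.length_eq_zero_iff.mp (Nat.le_zero.mp hl)
    subst this; simp [pvRuns_nil] at hp
  | succ n ih =>
    intro l hl p hp
    cases l with
    | nil => simp [pvRuns_nil] at hp
    | cons x t =>
      rw [pvRuns_cons] at hp
      rcases List.mem_cons.mp hp with h | h
      · subst h
        show (1 : Int) ≤ 1 + ((t.takeWhile (fun y => y == x)).length : Int)
        omega
      · exact ih _ (le_trans (List.length_dropWhile_le _ _) (by simp at hl; omega)) p h

theorem pvRuns_pos (l : List Bool) : ∀ p ∈ pvRuns l, 1 ≤ p.2 :=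
  pvRuns_pos_aux l.length l le_rfl

theorem pvLead_eq (t : List Bool) :
    pvLead t = ((t.takeWhile (fun y => y == true)).length : Int) := by
  induction t with
  | nil => rfl
  | cons x t ih =>
    cases x with
    | true => simp [pvLead, List.takeWhile_cons, ih]
    | false => simp [pvLead, List.takeWhile_cons]

theorem pvM_true (t : List Bool) :
    pvM (pvRuns (true :: t)) = max (pvLead t + 1) (pvM (pvRuns t)) := by
  match t with
  | [] => simp [pvRuns_cons, pvRuns_nil, pvM, pvLead]
  | true :: t' =>
    rw [pvRuns_cons true (true :: t'), pvRuns_cons true t']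
    simp [pvM, pvLead, List.takeWhile_cons, List.dropWhile_cons, pvLead_eq]
    omega
  | false :: t' =>
    rw [pvRuns_cons true (false :: t')]
    simp [pvM, pvLead, List.takeWhile_cons, List.dropWhile_cons]

theorem pvM_false (t : List Bool) : pvM (pvRuns (false :: t)) = pvM (pvRuns t) := by
  match t with
  | [] => simp [pvRuns_cons, pvRuns_nil, pvM]
  | true :: t' =>
    rw [pvRuns_cons false (true :: t')]
    simp [pvM, List.takeWhile_cons, List.dropWhile_cons]
  | false :: t' =>
    rw [pvRuns_cons false (false :: t'), pvRuns_cons false t']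
    simp [pvM, List.takeWhile_cons, List.dropWhile_cons]

theorem pvCore (l : List Bool) :
    l.foldr (fun x bc => pvStep bc x) ((0 : Int), (0 : Int)) = (pvM (pvRuns l), pvLead l) := by
  induction l with
  | nil => simp [pvRuns_nil, pvM, pvLead]
  | cons x t ih =>
    rw [List.foldr_cons, ih]
    cases x with
    | true => rw [pvM_true]; simp [pvStep, pvLead, max_comm]
    | false => simp [pvStep, pvM_false, pvLead]

theorem pvBridge (l : List String) (bc : Int × Int) :
    l.foldl pvStepA bc
      = ((l.filter (fun s => !(s == "in_progress"))).map
          (fun s => s == "achieved" || s == "exceeded")).foldl pvStep bc := by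
  induction l generalizing bc with
  | nil => rfl
  | cons s t ih =>
    by_cases hg : (s == "achieved" || s == "exceeded") = true
    · have hq : (!(s == "in_progress")) = true := by
        revert hg; simp; rintro (rfl | rfl) <;> decide
      rw [List.foldl_cons, List.filter_cons, if_pos hq, List.map_cons, List.foldl_cons]
      have h1 : pvStepA bc s = pvStep bc (s == "achieved" || s == "exceeded") := by
        simp [pvStepA, pvStep, hg]
      rw [h1]; exact ih _
    · by_cases hi : (s == "in_progress") = true
      · have hs : s = "in_progress" := by simpa using hi
        subst hs
        rw [List.foldl_cons, List.filter_cons, if_neg (by decide)]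
        have h1 : pvStepA bc "in_progress" = bc := by simp [pvStepA]
        rw [h1]; exact ih _
      · have hne : s ≠ "in_progress" := by simpa using hi
        have hq : (!(s == "in_progress")) = true := by simp [hne]
        rw [List.foldl_cons, List.filter_cons, if_pos hq, List.map_cons, List.foldl_cons]
        have h1 : pvStepA bc s = pvStep bc (s == "achieved" || s == "exceeded") := by
          simp [pvStepA, pvStep, hg, hne]
        rw [h1]; exact ih _

theorem pvFoldlMax (a b : Int) (l : List Int) : l.foldl max (max a b) = max a (l.foldl max b) := by
  induction l generalizing b with
  | nil => rfl
  | cons c t ih => rw [List.foldl_cons, List.foldl_cons, max_assoc]; exact ih _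

theorem pvMaxEq (r : List (Bool × Int)) (hpos : ∀ p ∈ r, 1 ≤ p.2) :
    (PySem.List.max? ((r.filter (fun p => p.1)).map (fun p => p.2)) (fun n => n)).getD 0
      = pvM r := by
  induction r with
  | nil => rfl
  | cons p t ih =>
    obtain ⟨k, n⟩ := p
    have hpt : ∀ q ∈ t, 1 ≤ q.2 := fun q hq => hpos q (List.mem_cons_of_mem _ hq)
    cases k with
    | false =>
      rw [List.filter_cons, if_neg (by simp)]
      rw [ih hpt]; simp [pvM]
    | true =>
      have hn : 1 ≤ n := hpos (true, n) List.mem_cons_self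
      rw [List.filter_cons, if_pos (by simp), List.map_cons]
      rw [PySem.List.max?_id_cons, Option.getD_some]
      show _ = pvM ((true, n) :: t)
      simp only [pvM, if_pos rfl]
      rw [← ih hpt]
      cases hrest : (t.filter (fun p => p.1)).map (fun p => p.2) with
      | nil => simp [PySem.List.max?]; omega
      | cons m r' =>
        rw [List.foldl_cons, pvFoldlMax, PySem.List.max?_id_cons, Option.getD_some]
        simp

-- ===== VERDICT (by name: the statement is the Claim_ definition above) =====
theorem calculate_best_streak_py_spec : Claim_equal_calculate_best_streak_py := by
  intro statuses _
  show calculate_best_streak_py statuses = calculate_best_streak_py_alt statuses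
  unfold calculate_best_streak_py calculate_best_streak_py_alt
  rw [pvBridge, List.filter_reverse, List.map_reverse, List.foldl_reverse, pvCore]
  exact pvMaxEq _ (pvRuns_pos _) |>.symm
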